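-- pv_equiv track=rewrite | github.com/pypi-data/pypi-mirror-385 | packages/python-pest/python_pest-0.1.1-py3-none-any.whl/pest/exceptions.py | error_context
-- ===== SOURCE A (Python) =====
-- def error_context(text: str, index: int) -> tuple[str, int, int]:
--     """Return a (line, lineno, col) tuple for position `index` in `text`."""
--     if not text:
--         return ("", 1, 0)
--
--     lines = text.splitlines(keepends=True)
--     cumulative_length = 0
--     target_line_index = len(lines) - 1
--
--     for i, line in enumerate(lines):
--         cumulative_length += len(line)
--         if index < cumulative_length:
--             target_line_index = i
--             break
--
--     # Line number (1-based)
--     line_number = target_line_index + 1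
--     # Column number within the line
--     column_number = index - (cumulative_length - len(lines[target_line_index])) + 1
--     current_line = lines[target_line_index].rstrip()
--
--     return (current_line, line_number, column_number)
-- ===== SOURCE B (Python) =====
-- from bisect import bisect_right
-- from itertools import accumulate
--
--
-- def error_context(text: str, index: int) -> tuple[str, int, int]:
--     """Return a (line, lineno, col) tuple for position `index` in `text`."""
--     if not text:
--         return ("", 1, 0)
--     lines = text.splitlines(keepends=True)
--     ends = list(accumulate(map(len, lines)))
--     target = min(bisect_right(ends, index), len(lines) - 1)
--     start = ends[target] - len(lines[target])
--     return (lines[target].rstrip(), target + 1, index - start + 1)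
-- ===== Notes on version B (the rewrite author's own statement) =====
-- stated objective: alternative
-- what changed: Replaced A's accumulating for-loop with break by a prefix table of cumulative line-end offsets (itertools.accumulate) and a bisect_right binary search, clamped to the last line.
import Mathlib
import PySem

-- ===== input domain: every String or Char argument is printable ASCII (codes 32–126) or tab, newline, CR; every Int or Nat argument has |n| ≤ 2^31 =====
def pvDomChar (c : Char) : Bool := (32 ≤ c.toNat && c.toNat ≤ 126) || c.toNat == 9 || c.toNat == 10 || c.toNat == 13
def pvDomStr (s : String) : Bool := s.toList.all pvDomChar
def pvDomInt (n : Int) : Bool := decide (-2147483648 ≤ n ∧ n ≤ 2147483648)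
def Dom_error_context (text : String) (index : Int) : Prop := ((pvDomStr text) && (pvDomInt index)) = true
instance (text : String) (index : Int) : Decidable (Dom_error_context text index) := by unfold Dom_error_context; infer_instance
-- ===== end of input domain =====

-- B replaces A's accumulate-and-break scan by a prefix-sum table plus binary search (bisect_right); same results everywhere (objective: alternative).

-- shared helper: Python's str.splitlines(keepends=True); exact on Dom's character set
-- (tab/newline/CR/printable ASCII), whose only line terminators are '\n', '\r' and '\r\n'.
def pvSplitKE (acc : List Char) : List Char → List (List Char)
  | [] => if acc.isEmpty then [] else [acc]
  | '\n' :: rest => (acc ++ ['\n']) :: pvSplitKE [] rest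
  | '\r' :: '\n' :: rest => (acc ++ ['\r', '\n']) :: pvSplitKE [] rest
  | '\r' :: rest => (acc ++ ['\r']) :: pvSplitKE [] rest
  | c :: rest => pvSplitKE (acc ++ [c]) rest

-- ===== PORT A =====
-- the for-loop with break: returns (cumulative_length, target_line_index)
def pvLoopA (idx : Int) (dflt : Nat) : List (List Char) → Int → Nat → Int × Nat
  | [], cum, _ => (cum, dflt)
  | l :: rest, cum, i =>
    let cum' := cum + (l.length : Int)
    if idx < cum' then (cum', i) else pvLoopA idx dflt rest cum' (i + 1)

def error_context (text : String) (index : Int) : String × Int × Int :=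
  if text = "" then ("", 1, 0)
  else
    let lines := pvSplitKE [] text.toList
    let r := pvLoopA index (lines.length - 1) lines 0 0
    let line := lines.getD r.2 []
    (String.ofList (PySem.Chars.rstrip line), (r.2 : Int) + 1,
      index - (r.1 - (line.length : Int)) + 1)

-- ===== PORT B =====
-- itertools.accumulate: running sums
def pvAccum (c : Int) : List Int → List Int
  | [] => []
  | x :: r => (c + x) :: pvAccum (c + x) r

-- bisect.bisect_right, ported as the stdlib's binary search
def pvBisect (a : List Int) (x : Int) (lo hi : Nat) : Nat :=
  if _h : lo < hi then
    let mid := (lo + hi) / 2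
    if x < a.getD mid 0 then pvBisect a x lo mid else pvBisect a x (mid + 1) hi
  else lo
termination_by hi - lo
decreasing_by all_goals omega

def error_context_alt (text : String) (index : Int) : String × Int × Int :=
  if text = "" then ("", 1, 0)
  else
    let lines := pvSplitKE [] text.toList
    let ends := pvAccum 0 (lines.map (fun l => (l.length : Int)))
    let target := min (pvBisect ends index 0 ends.length) (lines.length - 1)
    let line := lines.getD target []
    let start := ends.getD target 0 - (line.length : Int)
    (String.ofList (PySem.Chars.rstrip line), (target : Int) + 1, index - start + 1)

-- ===== PRECONDITION & SPEC =====
def Spec_error_context (text : String) (index : Int) (out : String × Int × Int) : Prop := out = error_context_alt text index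
instance (text : String) (index : Int) (out : String × Int × Int) : Decidable (Spec_error_context text index out) := by unfold Spec_error_context; infer_instance

-- ===== CLAIM (what is proved, stated in full; the proofs are below) =====
def Claim_equal_error_context : Prop := ∀ (text : String) (index : Int), Dom_error_context text index → Spec_error_context text index (error_context text index)

-- ===== LEMMAS AND PROOFS =====

-- every entry of a running-sum list of nonnegative increments is ≥ the start
theorem pvAccum_le_mem (xs : List Int) (hx : ∀ x ∈ xs, 0 ≤ x) :
    ∀ c e, e ∈ pvAccum c xs → c ≤ e := by
  induction xs with
  | nil => intro c e h; simp [pvAccum] at h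
  | cons x r ih =>
    intro c e h
    simp only [pvAccum, List.mem_cons] at h
    have hx0 : 0 ≤ x := hx x (by simp)
    rcases h with rfl | h
    · omega
    · have := ih (fun y hy => hx y (by simp [hy])) (c + x) e h; omega

theorem pvAccum_pairwise (xs : List Int) (hx : ∀ x ∈ xs, 0 ≤ x) :
    ∀ c, (pvAccum c xs).Pairwise (· ≤ ·) := by
  induction xs with
  | nil => intro c; simp [pvAccum]
  | cons x r ih =>
    intro c
    simp only [pvAccum]
    refine List.Pairwise.cons ?_ (ih (fun y hy => hx y (by simp [hy])) (c + x))
    intro e he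
    exact pvAccum_le_mem r (fun y hy => hx y (by simp [hy])) (c + x) e he

-- in a ≤-sorted list, a[i] ≤ x iff i is below the count of elements ≤ x
theorem sorted_getD_le_iff (x : Int) :
    ∀ (a : List Int), a.Pairwise (· ≤ ·) → ∀ i, i < a.length →
      (a.getD i 0 ≤ x ↔ i < a.countP (fun v => decide (v ≤ x))) := by
  intro a
  induction a with
  | nil => intro _ i hi; simp at hi
  | cons h t ih =>
    intro hp i hi
    have ht : t.Pairwise (· ≤ ·) := hp.of_cons
    have hle : ∀ e ∈ t, h ≤ e := by
      intro e he; exact List.rel_of_pairwise_cons hp he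
    by_cases hhx : h ≤ x
    · rw [List.countP_cons_of_pos (by simpa using hhx)]
      cases i with
      | zero => simp [hhx]
      | succ j =>
        have hj : j < t.length := by simpa using hi
        have := ih ht j hj
        simp only [List.getD_cons_succ]
        omega
    · have hct : t.countP (fun v => decide (v ≤ x)) = 0 := by
        rw [List.countP_eq_zero]
        intro e he
        have := hle e he
        simp; omega
      rw [List.countP_cons_of_neg (by simpa using hhx), hct]
      cases i with
      | zero => simpa using hhx
      | succ j =>
        have hj : j < t.length := by simpa using hi
        simp only [List.getD_cons_succ]
        constructor
        · intro hle'
          have hmem : t.getD j 0 ∈ t := by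
            rw [List.getD_eq_getElem _ _ hj]; exact List.getElem_mem hj
          have := hle _ hmem
          omega
        · omega

-- binary search on a sorted list lands on the count of elements ≤ x
theorem pvBisect_eq (a : List Int) (x : Int) (hs : a.Pairwise (· ≤ ·)) :
    ∀ n lo hi, hi - lo = n → lo ≤ a.countP (fun v => decide (v ≤ x)) →
      a.countP (fun v => decide (v ≤ x)) ≤ hi → hi ≤ a.length →
      pvBisect a x lo hi = a.countP (fun v => decide (v ≤ x)) := by
  intro n
  induction n using Nat.strong_induction_on with
  | _ n ih =>
    intro lo hi hn hlo hhi hlen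
    rw [pvBisect]
    by_cases hlh : lo < hi
    · simp only [hlh, dif_pos]
      have hmid1 : lo ≤ (lo + hi) / 2 := by omega
      have hmid2 : (lo + hi) / 2 < hi := by omega
      have hmlen : (lo + hi) / 2 < a.length := by omega
      have hkey := sorted_getD_le_iff x a hs ((lo + hi) / 2) hmlen
      by_cases hc : x < a.getD ((lo + hi) / 2) 0
      · simp only [hc, if_pos]
        have : ¬ ((lo + hi) / 2 < a.countP (fun v => decide (v ≤ x))) := by
          rw [← hkey]; omega
        exact ih (((lo + hi) / 2) - lo) (by omega) lo _ rfl hlo (by omega) (by omega)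
      · simp only [hc, if_neg, not_false_eq_true]
        have : (lo + hi) / 2 < a.countP (fun v => decide (v ≤ x)) := by
          rw [← hkey]; omega
        exact ih (hi - ((lo + hi) / 2 + 1)) (by omega) _ hi rfl (by omega) hhi hlen
    · simp only [hlh, dif_neg, not_false_eq_true]
      omega

-- A's scan-with-break, characterised through the running-sum table and the count k
theorem pvLoopA_eq (idx : Int) :
    ∀ (lines : List (List Char)) (dflt : Nat) (cum : Int) (i : Nat), lines ≠ [] →
      pvLoopA idx dflt lines cum i =
        (let es := pvAccum cum (lines.map (fun l => (l.length : Int)))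
         let k := es.countP (fun v => decide (v ≤ idx))
         if k < lines.length then (es.getD k 0, i + k)
         else (es.getD (lines.length - 1) 0, dflt)) := by
  intro lines
  induction lines with
  | nil => intro _ _ _ h; exact absurd rfl h
  | cons l rest ih =>
    intro dflt cum i _
    simp only [pvLoopA, List.map_cons, pvAccum]
    by_cases hbr : idx < cum + (l.length : Int)
    · -- break at this line: every later running sum is ≥ cum + len l > idx, so k = 0
      have hz : (pvAccum (cum + (l.length : Int)) (rest.map (fun l => (l.length : Int)))).countP
          (fun v => decide (v ≤ idx)) = 0 := by
        rw [List.countP_eq_zero]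
        intro e he
        have := pvAccum_le_mem _ (by intro y hy; simp at hy; obtain ⟨a, _, rfl⟩ := hy; positivity)
          (cum + (l.length : Int)) e he
        simp; omega
      simp only [hbr, if_pos]
      rw [List.countP_cons_of_neg (by simp; omega), hz]
      simp
    · -- no break here: the head running sum is counted
      simp only [hbr, if_neg, not_false_eq_true]
      rw [List.countP_cons_of_pos (by simp; omega)]
      cases rest with
      | nil => simp [pvLoopA, pvAccum]
      | cons m rs =>
        rw [ih dflt (cum + (l.length : Int)) (i + 1) (by simp)]
        simp only [List.length_cons, List.map_cons]
        have hlen : (m :: rs).length - 1 + 1 = (m :: rs).length := by simp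
        by_cases hk : (pvAccum (cum + (l.length : Int)) ((m :: rs).map (fun l => (l.length : Int)))).countP
            (fun v => decide (v ≤ idx)) < (m :: rs).length
        · simp only [List.map_cons] at hk
          rw [if_pos (by simpa using hk), if_pos (by simp at hk ⊢; omega)]
          simp only [List.getD_cons_succ]
          simp only [Prod.mk.injEq, true_and]; omega
        · simp only [List.map_cons] at hk
          rw [if_neg (by simpa using hk), if_neg (by simp at hk ⊢; omega)]
          simp only [Nat.add_sub_cancel, List.getD_cons_succ]

-- ===== VERDICT (by name: the statement is the Claim_ definition above) =====
theorem error_context_spec : Claim_equal_error_context := by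
  intro text index _
  unfold Spec_error_context error_context error_context_alt
  by_cases ht : text = ""
  · simp [ht]
  · simp only [ht, if_neg, not_false_eq_true]
    by_cases hnil : pvSplitKE [] text.toList = []
    · simp [hnil, pvLoopA, pvAccum, pvBisect]
    · set lines := pvSplitKE [] text.toList with hlines
      set es := pvAccum 0 (lines.map (fun l => (l.length : Int))) with hes
      set k := es.countP (fun v => decide (v ≤ index)) with hk
      have hnn : ∀ x ∈ lines.map (fun l => (l.length : Int)), 0 ≤ x := by
        intro x hx; simp at hx; obtain ⟨a, _, rfl⟩ := hx; positivity
      have hsor : es.Pairwise (· ≤ ·) := pvAccum_pairwise _ hnn 0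
      have hlen : es.length = lines.length := by
        rw [hes]
        clear_value lines
        clear hnil hlines hsor hnn hk
        generalize (0 : Int) = c
        induction lines generalizing c with
        | nil => simp [pvAccum]
        | cons l r ih => simp [pvAccum, ih]
      have hkle : k ≤ es.length := hk ▸ List.countP_le_length
      have hbi : pvBisect es index 0 es.length = k :=
        pvBisect_eq es index hsor es.length 0 es.length (by omega) (by omega) hkle le_rfl
      have hloop := pvLoopA_eq index lines (lines.length - 1) 0 0 hnil
      simp only at hloop
      rw [hloop, hbi, ← hes, ← hk]
      have hpos : 0 < lines.length := List.length_pos_iff.mpr hnil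
      by_cases hklt : k < lines.length
      · rw [if_pos hklt]
        have : min k (lines.length - 1) = k := by omega
        rw [this]
        simp
      · rw [if_neg hklt]
        have : min k (lines.length - 1) = lines.length - 1 := by omega
        rw [this]
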